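-- pv_equiv track=rewrite | github.com/Prashantijamgondi/FutureProof | futureproof-backend/app/services/code_analyzer.py | _get_complexity_distribution
-- ===== SOURCE A (Python) =====
-- from typing import Dict, List, Any, Optional
--
-- def _get_complexity_distribution(complexity_scores: List[int]) -> Dict[str, int]:
--     """Get distribution of complexity scores"""
--     if not complexity_scores:
--         return {"low": 0, "medium": 0, "high": 0}
--
--     return {
--         "low": len([c for c in complexity_scores if c < 5]),
--         "medium": len([c for c in complexity_scores if 5 <= c <= 10]),
--         "high": len([c for c in complexity_scores if c > 10])
--     }
-- ===== SOURCE B (Python) =====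
-- from typing import Dict, List
--
-- def _get_complexity_distribution(complexity_scores: List[int]) -> Dict[str, int]:
--     """Get distribution of complexity scores (single pass)."""
--     low = medium = high = 0
--     for c in complexity_scores:
--         if c < 5:
--             low += 1
--         elif c <= 10:
--             medium += 1
--         else:
--             high += 1
--     return {"low": low, "medium": medium, "high": high}
-- ===== Notes on version B (the rewrite author's own statement) =====
-- stated objective: simpler
-- what changed: Replaces the empty-list guard plus three separate filtering comprehensions with one counting loop that classifies each score once into low/medium/high.
import Mathlib
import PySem

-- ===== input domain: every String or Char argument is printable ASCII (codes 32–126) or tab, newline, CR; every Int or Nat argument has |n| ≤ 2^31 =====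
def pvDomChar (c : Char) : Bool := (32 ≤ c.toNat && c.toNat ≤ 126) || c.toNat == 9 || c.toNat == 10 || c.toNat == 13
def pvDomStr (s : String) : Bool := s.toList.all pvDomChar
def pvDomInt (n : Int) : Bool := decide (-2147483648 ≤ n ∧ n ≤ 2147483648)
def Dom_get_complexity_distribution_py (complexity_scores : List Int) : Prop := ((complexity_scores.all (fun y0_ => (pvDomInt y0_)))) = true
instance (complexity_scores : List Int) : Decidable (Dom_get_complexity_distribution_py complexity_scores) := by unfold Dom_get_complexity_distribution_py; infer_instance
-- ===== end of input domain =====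

-- B replaces A's empty-list guard plus three filtering comprehensions with one counting pass (objective: simpler).

-- ===== PORT A =====
-- three list comprehensions, each a filter, then len; empty-list guard first
def get_complexity_distribution_py (complexity_scores : List Int) : List (String × Int) :=
  if complexity_scores = [] then
    [("low", 0), ("medium", 0), ("high", 0)]
  else
    [("low", ((complexity_scores.filter (fun c => c < 5)).length : Int)),
     ("medium", ((complexity_scores.filter (fun c => 5 ≤ c ∧ c ≤ 10)).length : Int)),
     ("high", ((complexity_scores.filter (fun c => 10 < c)).length : Int))]

-- ===== PORT B =====
-- single fold carrying the three counters, classifying each score once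
def get_complexity_distribution_py_alt (complexity_scores : List Int) : List (String × Int) :=
  let t := complexity_scores.foldl
    (fun (acc : Int × Int × Int) c =>
      if c < 5 then (acc.1 + 1, acc.2.1, acc.2.2)
      else if c ≤ 10 then (acc.1, acc.2.1 + 1, acc.2.2)
      else (acc.1, acc.2.1, acc.2.2 + 1))
    (0, 0, 0)
  [("low", t.1), ("medium", t.2.1), ("high", t.2.2)]

-- ===== PRECONDITION & SPEC =====
def Spec_get_complexity_distribution_py (complexity_scores : List Int) (out : List (String × Int)) : Prop := out = get_complexity_distribution_py_alt complexity_scores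
instance (complexity_scores : List Int) (out : List (String × Int)) : Decidable (Spec_get_complexity_distribution_py complexity_scores out) := by unfold Spec_get_complexity_distribution_py; infer_instance

-- ===== CLAIM (what is proved, stated in full; the proofs are below) =====
def Claim_equal_get_complexity_distribution_py : Prop := ∀ (complexity_scores : List Int), Dom_get_complexity_distribution_py complexity_scores → Spec_get_complexity_distribution_py complexity_scores (get_complexity_distribution_py complexity_scores)

-- ===== LEMMAS AND PROOFS =====

lemma fold_counts (xs : List Int) (l m h : Int) :
    xs.foldl
      (fun (acc : Int × Int × Int) c =>
        if c < 5 then (acc.1 + 1, acc.2.1, acc.2.2)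
        else if c ≤ 10 then (acc.1, acc.2.1 + 1, acc.2.2)
        else (acc.1, acc.2.1, acc.2.2 + 1))
      (l, m, h)
    = (l + ((xs.filter (fun c => c < 5)).length : Int),
       m + ((xs.filter (fun c => 5 ≤ c ∧ c ≤ 10)).length : Int),
       h + ((xs.filter (fun c => 10 < c)).length : Int)) := by
  induction xs generalizing l m h with
  | nil => simp
  | cons x xs ih =>
    simp only [List.foldl_cons, List.filter_cons]
    by_cases h1 : x < 5
    · simp only [h1, if_pos, ih]
      have : ¬ (5 ≤ x ∧ x ≤ 10) := by omega
      simp [h1, this, show ¬ (10 < x) by omega]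
      omega
    · by_cases h2 : x ≤ 10
      · simp only [h1, if_neg, h2, if_pos, ih]
        have : (5 ≤ x ∧ x ≤ 10) := by omega
        simp [h1, h2, this, show ¬ (10 < x) by omega]
        omega
      · simp only [h1, h2, if_neg, ih]
        have : ¬ (5 ≤ x ∧ x ≤ 10) := by omega
        simp [h1, this, show 10 < x by omega]
        omega

-- ===== VERDICT (by name: the statement is the Claim_ definition above) =====
theorem get_complexity_distribution_py_spec : Claim_equal_get_complexity_distribution_py := by
  intro xs _
  unfold Spec_get_complexity_distribution_py get_complexity_distribution_py get_complexity_distribution_py_alt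
  rw [fold_counts]
  cases xs with
  | nil  => simp
  | cons x xs => simp
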